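-- pv_equiv track=rewrite | github.com/bradwood/yappt | yappt/utils.py | create_active_cells
-- ===== SOURCE A (Python) =====
-- from typing import Tuple
--
-- def create_active_cells(layout: Tuple, actives: Tuple):
--     # here we take the exploded tuple of tuple layout field and turn those cells which are active to True:
--     # so  ((0),(0,0),(0,0,0),(0,0),(0)) -> ((0),(0,0),(1,0,1),(0,0),(0)) give the actives of (3,5)
--
--     counter = 0
--     active_cells = []
--     for row in layout:
--         current_row = []
--         for _ in row:
--             if counter in actives:
--                 current_row.append(True)
--             else:
--                 current_row.append(False)
--             counter += 1
--         row_tup = tuple(current_row)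
--         active_cells.append(row_tup)
--     return tuple(active_cells)
-- ===== SOURCE B (Python) =====
-- def create_active_cells(layout, actives):
--     n = sum(len(row) for row in layout)
--     aset = set(actives)
--     flat = [i in aset for i in range(n)]
--     result = []
--     pos = 0
--     for row in layout:
--         k = len(row)
--         result.append(tuple(flat[pos:pos + k]))
--         pos += k
--     return tuple(result)
-- ===== Notes on version B (the rewrite author's own statement) =====
-- stated objective: faster
-- what changed: B splits the work into two passes — it hashes actives into a set once, builds a flat boolean table over range(total cell count), then reshapes it by slicing one row per layout row — removing A's per-cell linear scan of actives inside nested loops.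
import Mathlib
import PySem

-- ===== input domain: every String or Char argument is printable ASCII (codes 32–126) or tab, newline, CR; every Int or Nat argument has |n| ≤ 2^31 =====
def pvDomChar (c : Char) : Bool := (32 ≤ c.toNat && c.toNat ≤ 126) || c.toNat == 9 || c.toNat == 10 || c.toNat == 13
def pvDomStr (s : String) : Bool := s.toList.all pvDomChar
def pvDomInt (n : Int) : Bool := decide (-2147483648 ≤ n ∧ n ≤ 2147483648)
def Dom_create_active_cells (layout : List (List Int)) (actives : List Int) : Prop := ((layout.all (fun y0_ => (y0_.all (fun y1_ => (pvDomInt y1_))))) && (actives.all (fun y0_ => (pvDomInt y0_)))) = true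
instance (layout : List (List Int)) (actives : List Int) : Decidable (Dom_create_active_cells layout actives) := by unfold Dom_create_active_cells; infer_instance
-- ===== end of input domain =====

-- B hashes actives into a set, builds a flat membership table, then reshapes it by slicing; equivalence of return values is proved on all inputs.

-- ===== PORT A =====
-- A: nested loops threading an Int counter, testing `counter in actives` inline.
def create_active_cells (layout : List (List Int)) (actives : List Int) : List (List Bool) :=
  (layout.foldl
    (fun (st : Int × List (List Bool)) row =>
      let inner := row.foldl
        (fun (st2 : Int × List Bool) _ =>
          (st2.1 + 1, st2.2 ++ [decide (st2.1 ∈ actives)]))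
        (st.1, [])
      (inner.1, st.2 ++ [inner.2]))
    (0, [])).2

-- ===== PORT B =====
-- B: hash actives into a set, build the flat table `[i in aset for i in range(n)]`, then slice it row by row.
-- flat[pos:pos+k] with 0 ≤ pos and pos+k ≤ n is exactly (flat.drop pos).take k.
def create_active_cells_alt (layout : List (List Int)) (actives : List Int) : List (List Bool) :=
  let n := layout.foldl (fun (a : Nat) row => a + row.length) 0
  let aset := PySem.Set.ofList actives
  let flat := (List.range n).map (fun (i : Nat) => decide ((i : Int) ∈ aset))
  (layout.foldl
    (fun (st : Nat × List (List Bool)) row =>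
      let k := row.length
      (st.1 + k, st.2 ++ [(flat.drop st.1).take k]))
    (0, [])).2

-- ===== PRECONDITION & SPEC =====
def Spec_create_active_cells (layout : List (List Int)) (actives : List Int) (out : List (List Bool)) : Prop := out = create_active_cells_alt layout actives
instance (layout : List (List Int)) (actives : List Int) (out : List (List Bool)) : Decidable (Spec_create_active_cells layout actives out) := by unfold Spec_create_active_cells; infer_instance

-- ===== CLAIM (what is proved, stated in full; the proofs are below) =====
def Claim_equal_create_active_cells : Prop := ∀ (layout : List (List Int)) (actives : List Int), Dom_create_active_cells layout actives → Spec_create_active_cells layout actives (create_active_cells layout actives)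

-- ===== LEMMAS AND PROOFS =====

-- set membership agrees with list membership, so B's flat table is the plain membership table
theorem pvFlat_eq (actives : List Int) (n : Nat) :
    (List.range n).map (fun (i : Nat) => decide ((i : Int) ∈ PySem.Set.ofList actives))
      = (List.range n).map (fun (i : Nat) => decide ((i : Int) ∈ actives)) := by
  simp [PySem.Set.mem_ofList]

-- reference shape: the row starting at flat index c is the membership map over range' c (row length)
def pvSpine (actives : List Int) : List (List Int) → Nat → List (List Bool)
  | [], _ => []
  | r :: rs, c =>
      (List.range' c r.length).map (fun (i : Nat) => decide ((i : Int) ∈ actives))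
        :: pvSpine actives rs (c + r.length)

def pvSum : List (List Int) → Nat
  | [] => 0
  | r :: rs => r.length + pvSum rs

theorem pvSum_foldl (rs : List (List Int)) (a : Nat) :
    rs.foldl (fun (a : Nat) row => a + row.length) a = a + pvSum rs := by
  induction rs generalizing a with
  | nil => simp [pvSum]
  | cons r rs ih => simp [pvSum, ih]; omega

theorem pvA_inner (actives : List Int) (row : List Int) (c : Nat) (acc : List Bool) :
    row.foldl (fun (st2 : Int × List Bool) _ => (st2.1 + 1, st2.2 ++ [decide (st2.1 ∈ actives)]))
      ((c : Int), acc)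
      = (((c + row.length : Nat) : Int),
         acc ++ (List.range' c row.length).map (fun (i : Nat) => decide ((i : Int) ∈ actives))) := by
  induction row generalizing c acc with
  | nil => simp
  | cons x xs ih =>
    simp only [List.foldl_cons]
    rw [show ((c : Int) + 1) = ((c + 1 : Nat) : Int) from by push_cast; ring, ih]
    simp only [Prod.mk.injEq, List.length_cons]
    refine ⟨by push_cast; ring, ?_⟩
    simp [List.range'_succ]

theorem pvA_outer (actives : List Int) (rs : List (List Int)) (c : Nat) (acc : List (List Bool)) :
    (rs.foldl
      (fun (st : Int × List (List Bool)) row =>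
        let inner := row.foldl
          (fun (st2 : Int × List Bool) _ => (st2.1 + 1, st2.2 ++ [decide (st2.1 ∈ actives)]))
          (st.1, [])
        (inner.1, st.2 ++ [inner.2]))
      ((c : Int), acc)).2 = acc ++ pvSpine actives rs c := by
  induction rs generalizing c acc with
  | nil => simp [pvSpine]
  | cons r rest ih =>
    simp only [List.foldl_cons, pvA_inner]
    rw [ih]
    simp [pvSpine]

theorem pvB_outer (actives : List Int) (rs : List (List Int)) (n p : Nat)
    (h : p + pvSum rs ≤ n) (acc : List (List Bool)) :
    (rs.foldl
      (fun (st : Nat × List (List Bool)) row =>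
        (st.1 + row.length,
         st.2 ++ [(((List.range n).map (fun (i : Nat) => decide ((i : Int) ∈ actives))).drop st.1).take row.length]))
      (p, acc)).2 = acc ++ pvSpine actives rs p := by
  induction rs generalizing p acc with
  | nil => simp [pvSpine]
  | cons r rest ih =>
    simp only [pvSum] at h
    simp only [List.foldl_cons]
    have hdrop : ((List.range n).map (fun (i : Nat) => decide ((i : Int) ∈ actives))).drop p
        = (List.range' p (n - p)).map (fun (i : Nat) => decide ((i : Int) ∈ actives)) := by
      rw [← List.map_drop, List.range_eq_range', List.drop_range']
      norm_num
    have hsplit : List.range' p (n - p)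
        = List.range' p r.length ++ List.range' (p + r.length) (n - p - r.length) := by
      rw [show p + r.length = p + 1 * r.length from by ring, List.range'_append]
      congr 1
      omega
    have htake : (((List.range n).map (fun (i : Nat) => decide ((i : Int) ∈ actives))).drop p).take r.length
        = (List.range' p r.length).map (fun (i : Nat) => decide ((i : Int) ∈ actives)) := by
      rw [hdrop, hsplit, List.map_append, List.take_left' (by simp)]
    rw [htake, ih (p + r.length) (by omega)]
    simp [pvSpine]

-- ===== VERDICT (by name: the statement is the Claim_ definition above) =====
theorem create_active_cells_spec : Claim_equal_create_active_cells := by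
  intro layout actives _
  show create_active_cells layout actives = create_active_cells_alt layout actives
  have hA := pvA_outer actives layout 0 []
  have hB := pvB_outer actives layout (layout.foldl (fun (a : Nat) row => a + row.length) 0) 0
    (by rw [pvSum_foldl]) []
  simp only [Nat.cast_zero] at hA
  simp only [create_active_cells, create_active_cells_alt, pvFlat_eq]
  rw [hA, hB]
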